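-- pv_equiv track=rewrite | github.com/ball2jh/Hyperborea | iFit/firmware/tools/verify_ota.py | _decode_oid
-- ===== SOURCE A (Python) =====
-- def _decode_oid(oid_bytes):
--     """Decode a DER-encoded OID value to its dotted-decimal string."""
--     if not oid_bytes:
--         raise ValueError("Empty OID")
--     first = oid_bytes[0]
--     nodes = [first // 40, first % 40]
--     value = 0
--     for byte in oid_bytes[1:]:
--         value = (value << 7) | (byte & 0x7F)
--         if not (byte & 0x80):
--             nodes.append(value)
--             value = 0
--     if value != 0:
--         raise ValueError("Malformed OID")
--     return ".".join(str(n) for n in nodes)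
-- ===== SOURCE B (Python) =====
-- def _decode_oid(oid_bytes):
--     """Decode a DER-encoded OID value to its dotted-decimal string."""
--     if not oid_bytes:
--         raise ValueError("Empty OID")
--     first = oid_bytes[0]
--     nodes = [first // 40, first % 40]
--
--     # Pass 1: partition the tail into subidentifier groups, closing a group
--     # whenever a byte has the high bit clear; 'cur' keeps the unterminated rest.
--     groups = []
--     cur = []
--     for b in oid_bytes[1:]:
--         cur.append(b)
--         if not (b & 0x80):
--             groups.append(cur)
--             cur = []
--
--     def fold(group):
--         v = 0
--         for b in group:
--             v = (v << 7) | (b & 0x7F)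
--         return v
--
--     # Pass 2: fold each complete group into its integer value.
--     if fold(cur) != 0:
--         raise ValueError("Malformed OID")
--     nodes.extend(fold(g) for g in groups)
--     return ".".join(str(n) for n in nodes)
-- ===== Notes on version B (the rewrite author's own statement) =====
-- stated objective: alternative
-- what changed: Replaces A's single loop carrying a running accumulator (value) with a two-pass decomposition: pass 1 partitions the tail into subidentifier groups (plus unterminated remainder), pass 2 folds each group into its integer; A's lenient malformed check (folded remainder != 0) is preserved by folding the remainder.
-- outside the precondition, e.g. on _decode_oid([]): A raises ValueError, B raises ValueError; on _decode_oid([43, 129]): A raises ValueError, B raises ValueError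
import Mathlib
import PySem

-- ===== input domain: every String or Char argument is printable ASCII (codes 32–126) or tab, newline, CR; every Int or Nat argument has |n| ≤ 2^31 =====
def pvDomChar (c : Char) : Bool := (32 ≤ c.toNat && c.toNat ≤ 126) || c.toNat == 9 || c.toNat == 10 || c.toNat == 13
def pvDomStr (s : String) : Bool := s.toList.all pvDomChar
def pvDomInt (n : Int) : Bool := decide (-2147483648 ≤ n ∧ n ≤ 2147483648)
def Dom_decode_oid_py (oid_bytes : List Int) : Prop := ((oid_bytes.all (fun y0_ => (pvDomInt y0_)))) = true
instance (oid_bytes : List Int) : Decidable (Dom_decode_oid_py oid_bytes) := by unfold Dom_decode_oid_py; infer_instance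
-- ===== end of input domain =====

-- B replaces A's single stateful loop by a two-pass decomposition (partition the tail
-- into subidentifier groups, then fold each group); same cost, objective: alternative.
-- On inputs where Python A raises ValueError (empty input / malformed trailer) both
-- Pythons raise; those inputs are outside Pre_ and the ports return "" there.

-- ===== PORT A =====
-- A's loop state: (nodes, value); one step of A's for-loop body.
def decodeStepA (st : List Int × Int) (byte : Int) : List Int × Int :=
  let value := PySem.Int.bor (st.2 <<< (7 : Nat)) (PySem.Int.band byte 127)
  if PySem.Int.band byte 128 = 0 then (st.1 ++ [value], 0) else (st.1, value)

def decode_oid_py (oid_bytes : List Int) : String :=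
  match oid_bytes with
  | [] => ""  -- Python: raise ValueError("Empty OID"); excluded by Pre_
  | first :: rest =>
    let nodes0 : List Int := [PySem.Int.floordiv first 40, PySem.Int.mod first 40]
    let r := rest.foldl decodeStepA (nodes0, 0)
    if r.2 ≠ 0 then ""  -- Python: raise ValueError("Malformed OID"); excluded by Pre_
    else PySem.Str.join "." (r.1.map PySem.Int.toStr)

-- ===== PORT B =====
-- Pass-1 step: append byte to the current group, close it on a clear high bit.
def decodeStepB (st : List (List Int) × List Int) (b : Int) : List (List Int) × List Int :=
  let cur := st.2 ++ [b]
  if PySem.Int.band b 128 = 0 then (st.1 ++ [cur], []) else (st.1, cur)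

-- Pass-2: fold one group's low-7-bit chunks into an integer.
def decodeFold (g : List Int) : Int :=
  g.foldl (fun v b => PySem.Int.bor (v <<< (7 : Nat)) (PySem.Int.band b 127)) 0

def decode_oid_py_alt (oid_bytes : List Int) : String :=
  match oid_bytes with
  | [] => ""  -- Python: raise ValueError("Empty OID"); excluded by Pre_
  | first :: rest =>
    let nodes0 : List Int := [PySem.Int.floordiv first 40, PySem.Int.mod first 40]
    let p := rest.foldl decodeStepB ([], [])
    if decodeFold p.2 ≠ 0 then ""  -- Python: raise ValueError("Malformed OID"); excluded by Pre_
    else PySem.Str.join "." ((nodes0 ++ p.1.map decodeFold).map PySem.Int.toStr)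

-- ===== PRECONDITION & SPEC =====
-- Pre_ excludes exactly the inputs where Python A raises: the empty list, and inputs
-- whose trailing run of high-bit-set bytes (the unterminated subidentifier) contains a
-- byte with nonzero low 7 bits (A's lenient "Malformed OID" check).
def Pre_decode_oid_py (oid_bytes : List Int) : Prop :=
  oid_bytes ≠ [] ∧
  ∀ b ∈ (oid_bytes.drop 1).reverse.takeWhile (fun b => !(PySem.Int.band b 128 == 0)),
    PySem.Int.band b 127 = 0
instance (oid_bytes : List Int) : Decidable (Pre_decode_oid_py oid_bytes) := by
  unfold Pre_decode_oid_py; infer_instance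
def pvWitness_decode_oid_py : List Int := [43, 6, 1, 136, 55]

def Spec_decode_oid_py (oid_bytes : List Int) (out : String) : Prop := out = decode_oid_py_alt oid_bytes
instance (oid_bytes : List Int) (out : String) : Decidable (Spec_decode_oid_py oid_bytes out) := by unfold Spec_decode_oid_py; infer_instance

-- ===== CLAIM (what is proved, stated in full; the proofs are below) =====
def Claim_equal_decode_oid_py : Prop := ∀ (oid_bytes : List Int), Dom_decode_oid_py oid_bytes → Pre_decode_oid_py oid_bytes → Spec_decode_oid_py oid_bytes (decode_oid_py oid_bytes)

-- ===== LEMMAS AND PROOFS =====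

-- Folding one more byte into a group's value is one step of A's accumulator.
theorem decodeFold_snoc (g : List Int) (b : Int) :
    decodeFold (g ++ [b]) =
      PySem.Int.bor (decodeFold g <<< (7 : Nat)) (PySem.Int.band b 127) := by
  simp [decodeFold]

-- Invariant: A's loop over 'rest' from state (nodes ++ groups.map fold, fold cur)
-- tracks B's pass-1 over the same 'rest' from (groups, cur).
theorem stepAB (rest : List Int) :
    ∀ (nodes : List Int) (groups : List (List Int)) (cur : List Int),
      rest.foldl decodeStepA (nodes ++ groups.map decodeFold, decodeFold cur) =
        ((fun p => (nodes ++ (p.1).map decodeFold, decodeFold p.2))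
          (rest.foldl decodeStepB (groups, cur))) := by
  induction rest with
  | nil => intro nodes groups cur; rfl
  | cons b rest ih =>
    intro nodes groups cur
    simp only [List.foldl_cons]
    by_cases h : PySem.Int.band b 128 = 0
    · have hA : decodeStepA (nodes ++ groups.map decodeFold, decodeFold cur) b
          = (nodes ++ (groups ++ [cur ++ [b]]).map decodeFold, decodeFold []) := by
        simp [decodeStepA, h, decodeFold]
      have hB : decodeStepB (groups, cur) b = (groups ++ [cur ++ [b]], []) := by
        simp [decodeStepB, h]
      rw [hA, hB, ih]
    · have hA : decodeStepA (nodes ++ groups.map decodeFold, decodeFold cur) b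
          = (nodes ++ groups.map decodeFold, decodeFold (cur ++ [b])) := by
        simp [decodeStepA, h, decodeFold_snoc]
      have hB : decodeStepB (groups, cur) b = (groups, cur ++ [b]) := by
        simp [decodeStepB, h]
      rw [hA, hB, ih]

-- ===== VERDICT (by name: the statement is the Claim_ definition above) =====
theorem decode_oid_py_spec : Claim_equal_decode_oid_py := by
  intro oid_bytes _ _
  unfold Spec_decode_oid_py
  match oid_bytes with
  | [] => rfl
  | first :: rest =>
    unfold decode_oid_py decode_oid_py_alt
    have h := stepAB rest [PySem.Int.floordiv first 40, PySem.Int.mod first 40] [] []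
    simp only [List.map_nil, List.append_nil] at h
    have h0 : decodeFold [] = 0 := rfl
    rw [h0] at h
    simp only [h]
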